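-- pv_equiv track=rewrite | github.com/ai2050lin/Ai2050-UniOne | tests/glm5/ccmh_phase28_latent_variable.py | find_token_index
-- ===== SOURCE A (Python) =====
-- def find_token_index(tokens, target_word):
--     target_lower = target_word.lower().strip()
--     for i, t in enumerate(tokens):
--         if t.lower().strip() == target_lower:
--             return i
--     for i, t in enumerate(tokens):
--         if t.lower().strip()[:3] == target_lower[:3]:
--             return i
--     for i, t in enumerate(tokens):
--         if t.lower().strip()[:2] == target_lower[:2]:
--             return i
--     for i, t in enumerate(tokens):
--         if len(t.strip()) > 0 and t.lower().strip()[0] == target_lower[0]: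
--             return i
--     return -1
-- ===== SOURCE B (Python) =====
-- def find_token_index(tokens, target_word):
--     target_lower = target_word.lower().strip()
--     best_tier = 4
--     best_idx = -1
--     for i, t in enumerate(tokens):
--         s = t.lower().strip()
--         if s == target_lower:
--             tier = 0
--         elif s[:3] == target_lower[:3]:
--             tier = 1
--         elif s[:2] == target_lower[:2]:
--             tier = 2
--         elif target_lower and s and s[0] == target_lower[0]:
--             tier = 3
--         else:
--             tier = 4
--         if tier < best_tier:
--             best_tier = tier
--             best_idx = i
--     return best_idx
-- ===== Notes on version B (the rewrite author's own statement) =====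
-- stated objective: alternative
-- what changed: Replaces A's four sequential full scans (exact, 3-prefix, 2-prefix, first-char) by a single pass that computes each token's match tier and tracks the first index of the minimal tier.
import Mathlib
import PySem

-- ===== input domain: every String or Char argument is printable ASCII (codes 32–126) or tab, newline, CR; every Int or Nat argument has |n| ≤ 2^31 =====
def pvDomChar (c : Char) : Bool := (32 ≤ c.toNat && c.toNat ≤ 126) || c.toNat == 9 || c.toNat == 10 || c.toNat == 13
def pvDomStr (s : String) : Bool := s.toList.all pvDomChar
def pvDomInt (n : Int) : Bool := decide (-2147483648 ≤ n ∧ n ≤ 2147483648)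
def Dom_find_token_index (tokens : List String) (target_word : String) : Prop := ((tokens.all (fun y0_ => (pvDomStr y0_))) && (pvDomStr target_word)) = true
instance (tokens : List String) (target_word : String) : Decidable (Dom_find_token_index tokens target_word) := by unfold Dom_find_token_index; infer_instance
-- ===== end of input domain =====

-- B replaces A's four sequential scans (exact / 3-prefix / 2-prefix / first-char) by one
-- pass that scores each token with a match tier and keeps the first index of the minimal tier.

-- ===== PORT A =====
-- 'for i, t in enumerate(tokens): if p(t): return i' (returns none when the loop falls through)
def pvScanA (p : String → Bool) : List String → Int → Option Int
  | [], _ => none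
  | t :: ts, i => if p t then some i else pvScanA p ts (i + 1)

-- In pass 4 Python evaluates target_lower[0], which raises IndexError when target_lower is
-- empty; the port compares the two pyGet? options instead, so those inputs (excluded by
-- Pre_find_token_index) are the only ones where the port differs from the Python.
def find_token_index (tokens : List String) (target_word : String) : Int :=
  let target_lower := PySem.Str.strip (PySem.Str.lower target_word)
  match pvScanA (fun t => PySem.Str.strip (PySem.Str.lower t) == target_lower) tokens 0 with
  | some i => i
  | none =>
    match pvScanA (fun t => PySem.Str.slice (PySem.Str.strip (PySem.Str.lower t)) none (some 3) == PySem.Str.slice target_lower none (some 3)) tokens 0 with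
    | some i => i
    | none =>
      match pvScanA (fun t => PySem.Str.slice (PySem.Str.strip (PySem.Str.lower t)) none (some 2) == PySem.Str.slice target_lower none (some 2)) tokens 0 with
      | some i => i
      | none =>
        match pvScanA (fun t => decide (0 < PySem.Str.len (PySem.Str.strip t)) && (PySem.Str.pyGet? (PySem.Str.strip (PySem.Str.lower t)) 0 == PySem.Str.pyGet? target_lower 0)) tokens 0 with
        | some i => i
        | none => -1

-- ===== PORT B =====
-- the tier of one token: 0 exact, 1 three-char prefix, 2 two-char prefix, 3 first char, 4 none
def pvTier (tl t : String) : Nat :=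
  let s := PySem.Str.strip (PySem.Str.lower t)
  if s == tl then 0
  else if PySem.Str.slice s none (some 3) == PySem.Str.slice tl none (some 3) then 1
  else if PySem.Str.slice s none (some 2) == PySem.Str.slice tl none (some 2) then 2
  else if !(tl == "") && !(s == "") && (PySem.Str.pyGet? s 0 == PySem.Str.pyGet? tl 0) then 3
  else 4

-- the single for-loop of Source B: state (best_tier, best_idx, i)
def pvLoopB (tl : String) : List String → Nat → Int → Int → Int
  | [], _, best_idx, _ => best_idx
  | t :: ts, best_tier, best_idx, i =>
    let tier := pvTier tl t
    if tier < best_tier then pvLoopB tl ts tier i (i + 1)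
    else pvLoopB tl ts best_tier best_idx (i + 1)

def find_token_index_alt (tokens : List String) (target_word : String) : Int :=
  pvLoopB (PySem.Str.strip (PySem.Str.lower target_word)) tokens 4 (-1) 0

-- ===== PRECONDITION & SPEC =====
-- Pre_ excludes exactly the inputs where Python A raises IndexError (target strips to empty,
-- tokens non-empty, and no token strips to empty, so pass 4 evaluates target_lower[0]).
def Pre_find_token_index (tokens : List String) (target_word : String) : Prop :=
  ¬ (PySem.Str.strip (PySem.Str.lower target_word) = "" ∧ tokens ≠ [] ∧
     ∀ t ∈ tokens, PySem.Str.strip (PySem.Str.lower t) ≠ "")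
instance (tokens : List String) (target_word : String) : Decidable (Pre_find_token_index tokens target_word) := by unfold Pre_find_token_index; infer_instance

def pvWitness_find_token_index : List String × String := (["Hello", "world"], "wo")

def Spec_find_token_index (tokens : List String) (target_word : String) (out : Int) : Prop := out = find_token_index_alt tokens target_word
instance (tokens : List String) (target_word : String) (out : Int) : Decidable (Spec_find_token_index tokens target_word out) := by unfold Spec_find_token_index; infer_instance

-- ===== CLAIM (what is proved, stated in full; the proofs are below) =====
def Claim_equal_find_token_index : Prop := ∀ (tokens : List String) (target_word : String), Dom_find_token_index tokens target_word → Pre_find_token_index tokens target_word → Spec_find_token_index tokens target_word (find_token_index tokens target_word)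

-- ===== LEMMAS AND PROOFS =====

-- characters: lowering a character does not change whether it is whitespace
theorem pv_isspace_lowerChar (c : Char) :
    PySem.Chars.isspace (PySem.Chars.lowerChar c) = PySem.Chars.isspace c := by
  unfold PySem.Chars.lowerChar
  by_cases h : PySem.Chars.isupper c = true
  · have hb : 65 ≤ c.toNat ∧ c.toNat ≤ 90 := by
      unfold PySem.Chars.isupper at h
      simp only [Bool.and_eq_true, decide_eq_true_eq, Char.le_def] at h
      exact h
    have hv : (Char.ofNat (c.toNat + 32)).toNat = c.toNat + 32 := by
      rw [Char.toNat_ofNat]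
      have hval : (c.toNat + 32).isValidChar := Or.inl (by omega)
      simp [hval]
    simp only [h, if_true]
    have e1 : PySem.Chars.isspace (Char.ofNat (c.toNat + 32)) = false := by
      unfold PySem.Chars.isspace
      simp only [hv, Bool.or_eq_false_iff, Bool.and_eq_false_iff, decide_eq_false_iff_not]
      omega
    have e2 : PySem.Chars.isspace c = false := by
      unfold PySem.Chars.isspace
      simp only [Bool.or_eq_false_iff, Bool.and_eq_false_iff, decide_eq_false_iff_not]
      omega
    rw [e1, e2]
  · simp [h]

-- strip is empty iff every character is whitespace
theorem pv_strip_eq_nil_iff (l : List Char) :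
    PySem.Chars.strip l = [] ↔ ∀ c ∈ l, PySem.Chars.isspace c = true := by
  unfold PySem.Chars.strip PySem.Chars.rstrip PySem.Chars.lstrip
  rw [List.reverse_eq_nil_iff, List.dropWhile_eq_nil_iff]
  constructor
  · intro h c hc
    have hsplit : c ∈ List.takeWhile PySem.Chars.isspace l ∨ c ∈ List.dropWhile PySem.Chars.isspace l := by
      rw [← List.mem_append, List.takeWhile_append_dropWhile]
      exact hc
    rcases hsplit with h1 | h1
    · exact List.mem_takeWhile_imp h1
    · exact h c (List.mem_reverse.mpr h1)
  · intro h c hc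
    exact h c ((List.dropWhile_sublist _).subset (List.mem_reverse.mp hc))

theorem pv_str_strip_empty_iff (u : String) :
    PySem.Str.strip u = "" ↔ ∀ c ∈ u.toList, PySem.Chars.isspace c = true := by
  constructor
  · intro h
    have h' : (PySem.Str.strip u).toList = [] := by rw [h]; rfl
    rw [PySem.Str.toList_strip] at h'
    exact (pv_strip_eq_nil_iff _).mp h'
  · intro h
    have h' : PySem.Chars.strip u.toList = [] := (pv_strip_eq_nil_iff _).mpr h
    rw [← String.ofList_toList (s := PySem.Str.strip u), PySem.Str.toList_strip, h']

-- t.strip() is non-empty iff t.lower().strip() is non-empty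
theorem pv_striplen_iff (t : String) :
    (0 < PySem.Str.len (PySem.Str.strip t)) ↔ PySem.Str.strip (PySem.Str.lower t) ≠ "" := by
  have h2 : PySem.Str.strip (PySem.Str.lower t) = "" ↔ ∀ c ∈ t.toList, PySem.Chars.isspace c = true := by
    rw [pv_str_strip_empty_iff, PySem.Str.toList_lower]
    unfold PySem.Chars.lower
    constructor
    · intro h c hc
      have := h _ (List.mem_map_of_mem (f := PySem.Chars.lowerChar) hc)
      rwa [pv_isspace_lowerChar] at this
    · intro h c hc
      rcases List.mem_map.mp hc with ⟨d, hd, rfl⟩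
      rw [pv_isspace_lowerChar]
      exact h d hd
  have h3 : (0 < PySem.Str.len (PySem.Str.strip t)) ↔ PySem.Str.strip t ≠ "" := by
    rw [PySem.Str.len_eq]
    constructor
    · intro h he
      rw [he] at h
      simp at h
    · intro h
      have hne : (PySem.Str.strip t).toList ≠ [] := by
        intro he
        exact h (by rw [← String.ofList_toList (s := PySem.Str.strip t), he])
      exact_mod_cast List.length_pos_of_ne_nil hne
  rw [h3]
  simp only [ne_eq]
  rw [pv_str_strip_empty_iff t, h2]

-- pass-1 predicate = (tier ≤ 0)
theorem pv_pred0 (tl t : String) :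
    (PySem.Str.strip (PySem.Str.lower t) == tl) = decide (pvTier tl t ≤ 0) := by
  simp only [pvTier]
  split_ifs with h1 h2 h3 h4 <;> simp_all

-- pass-2 predicate = (tier ≤ 1)
theorem pv_pred1 (tl t : String) :
    (PySem.Str.slice (PySem.Str.strip (PySem.Str.lower t)) none (some 3) == PySem.Str.slice tl none (some 3)) = decide (pvTier tl t ≤ 1) := by
  simp only [pvTier]
  split_ifs with h1 h2 h3 h4 <;> simp_all

-- the 3-prefix match implies the 2-prefix match
theorem pv_slice32 (a b : String)
    (h : PySem.Str.slice a none (some 3) = PySem.Str.slice b none (some 3)) :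
    PySem.Str.slice a none (some 2) = PySem.Str.slice b none (some 2) := by
  have hl := congrArg String.toList h
  simp only [PySem.Str.toList_slice, PySem.Chars.slice_eq_listSlice] at hl
  rw [PySem.List.slice_to a.toList (b := 3) (by norm_num),
      PySem.List.slice_to b.toList (b := 3) (by norm_num)] at hl
  unfold PySem.Str.slice
  simp only [PySem.Chars.slice_eq_listSlice]
  rw [PySem.List.slice_to a.toList (b := 2) (by norm_num),
      PySem.List.slice_to b.toList (b := 2) (by norm_num)]
  congr 1
  have h2 := congrArg (List.take 2) hl
  simpa [List.take_take] using h2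

-- pass-3 predicate = (tier ≤ 2)
theorem pv_pred2 (tl t : String) :
    (PySem.Str.slice (PySem.Str.strip (PySem.Str.lower t)) none (some 2) == PySem.Str.slice tl none (some 2)) = decide (pvTier tl t ≤ 2) := by
  simp only [pvTier]
  split_ifs with h1 h2 h3 h4
  · simp only [beq_iff_eq] at h1
    rw [h1]
    simp
  · simp only [beq_iff_eq] at h2
    simp [pv_slice32 _ _ h2]
  · simp [h3]
  · simp only [Bool.not_eq_true] at h3
    simp [h3]
  · simp only [Bool.not_eq_true] at h3
    simp [h3]

-- pass-4 predicate equals B's tier-3 condition (on every input)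
theorem pv_pred3 (tl t : String) :
    (decide (0 < PySem.Str.len (PySem.Str.strip t)) && (PySem.Str.pyGet? (PySem.Str.strip (PySem.Str.lower t)) 0 == PySem.Str.pyGet? tl 0))
    = (!(tl == "") && !(PySem.Str.strip (PySem.Str.lower t) == "") && (PySem.Str.pyGet? (PySem.Str.strip (PySem.Str.lower t)) 0 == PySem.Str.pyGet? tl 0)) := by
  by_cases hs : PySem.Str.strip (PySem.Str.lower t) = ""
  · have hlen : ¬ (0 < PySem.Str.len (PySem.Str.strip t)) := by
      rw [pv_striplen_iff]
      simp [hs]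
    have e1 : decide (0 < PySem.Str.len (PySem.Str.strip t)) = false := by simpa using hlen
    have e2 : (!(PySem.Str.strip (PySem.Str.lower t) == "")) = false := by simp [hs]
    rw [e1, e2]
    simp
  · have hlen : 0 < PySem.Str.len (PySem.Str.strip t) := (pv_striplen_iff t).mpr hs
    have e1 : decide (0 < PySem.Str.len (PySem.Str.strip t)) = true := by simpa using hlen
    have e2 : (!(PySem.Str.strip (PySem.Str.lower t) == "")) = true := by simpa using hs
    rw [e1, e2]
    by_cases hg : PySem.Str.pyGet? (PySem.Str.strip (PySem.Str.lower t)) 0 = PySem.Str.pyGet? tl 0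
    · have hsome : ∃ c, PySem.Str.pyGet? (PySem.Str.strip (PySem.Str.lower t)) 0 = some c := by
        have hne : (PySem.Str.strip (PySem.Str.lower t)).toList ≠ [] := by
          intro he
          exact hs (by rw [← String.ofList_toList (s := PySem.Str.strip (PySem.Str.lower t)), he])
        rcases List.exists_cons_of_ne_nil hne with ⟨c, cs, hc⟩
        refine ⟨c, ?_⟩
        rw [PySem.Str.pyGet?_eq, PySem.Chars.pyGet?_eq_listPyGet?, hc, PySem.List.pyGet?_zero_cons]
      have htl : (tl == "") = false := by
        simp only [beq_eq_false_iff_ne, ne_eq]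
        intro he
        subst he
        rcases hsome with ⟨c, hc⟩
        rw [hc] at hg
        have hnone : PySem.Str.pyGet? "" 0 = none := by decide
        rw [hnone] at hg
        exact Option.some_ne_none c hg
      rw [htl]
      simp [hg]
    · have hgf : (PySem.Str.pyGet? (PySem.Str.strip (PySem.Str.lower t)) 0 == PySem.Str.pyGet? tl 0) = false := by
        simpa using hg
      rw [hgf]
      simp

-- tiers are at most 4
theorem pv_tier_le_4 (tl t : String) : pvTier tl t ≤ 4 := by
  simp only [pvTier]
  split_ifs <;> omega

-- tier = 3 makes the tier-3 condition true
theorem pv_tier3_c3 (tl t : String) (h : pvTier tl t = 3) :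
    (!(tl == "") && !(PySem.Str.strip (PySem.Str.lower t) == "") && (PySem.Str.pyGet? (PySem.Str.strip (PySem.Str.lower t)) 0 == PySem.Str.pyGet? tl 0)) = true := by
  simp only [pvTier] at h
  split_ifs at h with h1 h2 h3 h4 <;> simp_all

-- tier = 4 makes the tier-3 condition false
theorem pv_tier4_no3 (tl t : String) (h : pvTier tl t = 4) :
    (!(tl == "") && !(PySem.Str.strip (PySem.Str.lower t) == "") && (PySem.Str.pyGet? (PySem.Str.strip (PySem.Str.lower t)) 0 == PySem.Str.pyGet? tl 0)) = false := by
  simp only [pvTier] at h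
  split_ifs at h with h1 h2 h3 h4 <;> simp_all

-- under "no token has tier ≤ 2", B's tier-3 condition decides (tier ≤ 3)
theorem pv_pred3' (tl t : String) (h : 3 ≤ pvTier tl t) :
    (!(tl == "") && !(PySem.Str.strip (PySem.Str.lower t) == "") && (PySem.Str.pyGet? (PySem.Str.strip (PySem.Str.lower t)) 0 == PySem.Str.pyGet? tl 0)) = decide (pvTier tl t ≤ 3) := by
  have h4 := pv_tier_le_4 tl t
  by_cases h3 : pvTier tl t = 3
  · rw [pv_tier3_c3 tl t h3, h3]
    simp
  · have he : pvTier tl t = 4 := by omega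
    rw [pv_tier4_no3 tl t he, he]
    simp

-- the minimum tier of a token list
def pvMinT (tl : String) (ts : List String) : Nat :=
  ts.foldr (fun t m => min (pvTier tl t) m) 4

theorem pv_minT_le_4 (tl : String) (ts : List String) : pvMinT tl ts ≤ 4 := by
  induction ts with
  | nil => simp [pvMinT]
  | cons t ts ih => simp only [pvMinT, List.foldr_cons] at *; omega

theorem pv_lt_minT_mp (tl : String) (ts : List String) (m : Nat)
    (h : m < pvMinT tl ts) : ∀ t ∈ ts, m < pvTier tl t := by
  induction ts with
  | nil => simp
  | cons t ts ih =>
    have h' : m < min (pvTier tl t) (pvMinT tl ts) := h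
    rw [lt_min_iff] at h'
    intro x hx
    rcases List.mem_cons.mp hx with rfl | hx'
    · exact h'.1
    · exact ih h'.2 x hx'

theorem pv_lt_minT_mpr (tl : String) (ts : List String) (m : Nat) (hm : m < 4)
    (h : ∀ t ∈ ts, m < pvTier tl t) : m < pvMinT tl ts := by
  induction ts with
  | nil => simpa [pvMinT] using hm
  | cons t ts ih =>
    have : m < min (pvTier tl t) (pvMinT tl ts) := by
      rw [lt_min_iff]
      exact ⟨h t List.mem_cons_self, ih (fun x hx => h x (List.mem_cons_of_mem _ hx))⟩
    exact this

theorem pv_minT_le_mem (tl : String) (ts : List String) (t : String) (ht : t ∈ ts) :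
    pvMinT tl ts ≤ pvTier tl t := by
  by_contra h
  push_neg at h
  exact absurd (pv_lt_minT_mp tl ts (pvTier tl t) h t ht) (lt_irrefl _)

-- scan respects pointwise-equal predicates (on members)
theorem pv_scan_congr (p q : String → Bool) (ts : List String) (i : Int)
    (h : ∀ t ∈ ts, p t = q t) : pvScanA p ts i = pvScanA q ts i := by
  induction ts generalizing i with
  | nil => rfl
  | cons t ts ih =>
    simp only [pvScanA]
    rw [h t List.mem_cons_self]
    split
    · rfl
    · exact ih _ (fun x hx => h x (List.mem_cons_of_mem _ hx))

theorem pv_scan_none (p : String → Bool) (ts : List String) (i : Int)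
    (h : ∀ t ∈ ts, p t = false) : pvScanA p ts i = none := by
  induction ts generalizing i with
  | nil => rfl
  | cons t ts ih =>
    simp only [pvScanA, h t List.mem_cons_self, Bool.false_eq_true, if_false]
    exact ih _ (fun x hx => h x (List.mem_cons_of_mem _ hx))

theorem pv_scan_found (p : String → Bool) (ts : List String) (i : Int)
    (h : ∃ t ∈ ts, p t = true) : pvScanA p ts i = some (i + (ts.findIdx p : Int)) := by
  induction ts generalizing i with
  | nil => simp at h
  | cons t ts ih =>
    by_cases hp : p t = true
    · simp [pvScanA, hp, List.findIdx_cons]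
    · have hex : ∃ x ∈ ts, p x = true := by
        rcases h with ⟨x, hx, hpx⟩
        rcases List.mem_cons.mp hx with rfl | hx'
        · exact absurd hpx hp
        · exact ⟨x, hx', hpx⟩
      simp only [pvScanA, hp, Bool.false_eq_true, if_false]
      rw [ih _ hex]
      simp only [List.findIdx_cons, hp, cond_false]
      congr 1
      push_cast
      ring

theorem pv_findIdx_congr (p q : String → Bool) (ts : List String)
    (h : ∀ t ∈ ts, p t = q t) : ts.findIdx p = ts.findIdx q := by
  induction ts with
  | nil => rfl
  | cons t ts ih =>
    simp only [List.findIdx_cons, h t List.mem_cons_self,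
      ih (fun x hx => h x (List.mem_cons_of_mem _ hx))]

-- B's loop returns the first index of the minimal tier (below the running best)
theorem pv_loopB_spec (tl : String) (ts : List String) (b : Nat) (idx i0 : Int)
    (hb : b ≤ 4) :
    pvLoopB tl ts b idx i0 =
      if pvMinT tl ts < b then i0 + (ts.findIdx (fun t => pvTier tl t == pvMinT tl ts) : Int)
      else idx := by
  induction ts generalizing b idx i0 with
  | nil =>
    have hn : ¬ pvMinT tl ([] : List String) < b := by
      simp only [pvMinT, List.foldr_nil]
      omega
    simp [pvLoopB, hn]
  | cons t ts ih =>
    have hmin : pvMinT tl (t :: ts) = min (pvTier tl t) (pvMinT tl ts) := rfl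
    by_cases hk : pvTier tl t < b
    · simp only [pvLoopB]
      rw [if_pos hk, ih (pvTier tl t) i0 (i0 + 1) (pv_tier_le_4 tl t)]
      by_cases hM : pvMinT tl ts < pvTier tl t
      · have h1 : pvMinT tl (t :: ts) = pvMinT tl ts := by rw [hmin]; omega
        have h2 : pvMinT tl (t :: ts) < b := by omega
        rw [if_pos hM, if_pos h2, h1]
        have hpt : (pvTier tl t == pvMinT tl ts) = false := by
          simp only [beq_eq_false_iff_ne, ne_eq]
          omega
        simp only [List.findIdx_cons, hpt, cond_false]
        push_cast
        ring
      · have h1 : pvMinT tl (t :: ts) = pvTier tl t := by rw [hmin]; omega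
        have h2 : pvMinT tl (t :: ts) < b := by omega
        rw [if_neg hM, if_pos h2, h1]
        have hpt : (pvTier tl t == pvTier tl t) = true := by simp
        simp only [List.findIdx_cons, hpt, cond_true]
        simp
    · simp only [pvLoopB]
      rw [if_neg hk, ih b idx (i0 + 1) hb]
      by_cases hM : pvMinT tl ts < b
      · have h1 : pvMinT tl (t :: ts) = pvMinT tl ts := by rw [hmin]; omega
        have h2 : pvMinT tl (t :: ts) < b := by omega
        rw [if_pos hM, if_pos h2, h1]
        have hpt : (pvTier tl t == pvMinT tl ts) = false := by
          simp only [beq_eq_false_iff_ne, ne_eq]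
          omega
        simp only [List.findIdx_cons, hpt, cond_false]
        push_cast
        ring
      · have h2 : ¬ pvMinT tl (t :: ts) < b := by rw [hmin]; omega
        rw [if_neg hM, if_neg h2]

-- the main equivalence, for every input (where Python A would raise, its port's pass-4
-- option comparison is false and both ports return -1)
theorem pv_main (tokens : List String) (target_word : String) :
    find_token_index tokens target_word = find_token_index_alt tokens target_word := by
  simp only [find_token_index, find_token_index_alt]
  set tl := PySem.Str.strip (PySem.Str.lower target_word) with htl
  have hM4 : pvMinT tl tokens ≤ 4 := pv_minT_le_4 tl tokens
  rw [pv_loopB_spec tl tokens 4 (-1) 0 (le_refl 4)]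
  rw [pv_scan_congr _ (fun t => decide (pvTier tl t ≤ 0)) tokens 0
      (fun t _ => pv_pred0 tl t)]
  rw [pv_scan_congr _ (fun t => decide (pvTier tl t ≤ 1)) tokens 0
      (fun t _ => pv_pred1 tl t)]
  rw [pv_scan_congr _ (fun t => decide (pvTier tl t ≤ 2)) tokens 0
      (fun t _ => pv_pred2 tl t)]
  rw [pv_scan_congr _ (fun t => (!(tl == "") && !(PySem.Str.strip (PySem.Str.lower t) == "") && (PySem.Str.pyGet? (PySem.Str.strip (PySem.Str.lower t)) 0 == PySem.Str.pyGet? tl 0))) tokens 0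
      (fun t _ => pv_pred3 tl t)]
  have hnone : ∀ m : Nat, m < pvMinT tl tokens →
      pvScanA (fun t => decide (pvTier tl t ≤ m)) tokens 0 = none := by
    intro m hm
    apply pv_scan_none
    intro t ht
    have hmt := pv_lt_minT_mp tl tokens m hm t ht
    simp only [decide_eq_false_iff_not]
    omega
  have hfound : ∀ m : Nat, m < 4 → pvMinT tl tokens = m →
      pvScanA (fun t => decide (pvTier tl t ≤ m)) tokens 0
        = some ((tokens.findIdx (fun t => pvTier tl t == pvMinT tl tokens) : Int)) := by
    intro m hmlt hm
    have hex : ∃ t ∈ tokens, (fun t => decide (pvTier tl t ≤ m)) t = true := by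
      by_contra hno
      push_neg at hno
      have hlt : m < pvMinT tl tokens := by
        apply pv_lt_minT_mpr tl tokens m hmlt
        intro t ht
        have hx : ¬ (pvTier tl t ≤ m) := by simpa using hno t ht
        omega
      omega
    rw [pv_scan_found _ _ _ hex]
    rw [pv_findIdx_congr (fun t => decide (pvTier tl t ≤ m)) (fun t => pvTier tl t == pvMinT tl tokens) tokens
      (fun t ht => by
        have h1 := pv_minT_le_mem tl tokens t ht
        rw [hm] at h1 ⊢
        by_cases h : pvTier tl t = m
        · simp [h]
        · have hne : pvTier tl t ≠ m := h
          have hnle : ¬ (pvTier tl t ≤ m) := by omega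
          simp [hne, hnle])]
    simp
  by_cases h0 : pvMinT tl tokens = 0
  · rw [hfound 0 (by omega) h0, if_pos (by omega)]
    simp
  · by_cases h1 : pvMinT tl tokens = 1
    · rw [hnone 0 (by omega), hfound 1 (by omega) h1, if_pos (by omega)]
      simp
    · by_cases h2 : pvMinT tl tokens = 2
      · rw [hnone 0 (by omega), hnone 1 (by omega), hfound 2 (by omega) h2, if_pos (by omega)]
        simp
      · by_cases h3 : pvMinT tl tokens = 3
        · rw [hnone 0 (by omega), hnone 1 (by omega), hnone 2 (by omega)]
          rw [pv_scan_congr _ (fun t => decide (pvTier tl t ≤ 3)) tokens 0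
            (fun t ht => pv_pred3' tl t (by
              have := pv_minT_le_mem tl tokens t ht
              omega))]
          rw [hfound 3 (by omega) h3, if_pos (by omega)]
          simp
        · have h4 : pvMinT tl tokens = 4 := by omega
          rw [hnone 0 (by omega), hnone 1 (by omega), hnone 2 (by omega)]
          rw [pv_scan_none _ _ _ (fun t ht => pv_tier4_no3 tl t (by
            have hle := pv_tier_le_4 tl t
            have := pv_minT_le_mem tl tokens t ht
            omega))]
          rw [if_neg (by omega)]

-- ===== VERDICT (by name: the statement is the Claim_ definition above) =====
theorem find_token_index_spec : Claim_equal_find_token_index := by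
  intro tokens target_word _ _
  unfold Spec_find_token_index
  exact pv_main tokens target_word
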